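-- pv_equiv track=rewrite | github.com/TeamW-P/RNABayesPairing2 | bayespairing/src/validation.py | computeCountAndLists
-- ===== SOURCE A (Python) =====
-- def computeCountAndLists(s):
--     """
--     Constructs nucleotide dictionary, dinucleotide dictionary and list of dicnucleotides
--
--     :param s: Nucleotide sequence String consisting of A,C,G,U or .
--     :return: Tuple of nucleotide counts, dinucleotide counts and dict of dinucleotides in List form
--     """
--     # WARNING: Use of function count(s,'UU') returns 1 on word UUU
--     # since it apparently counts only nonoverlapping words UU
--     # For this reason, we work with the indices.
--
--     # Initialize lists and mono- and dinucleotide dictionaries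
--     # List is a dictionary of lists
--     List = {'A': [], 'C': [], 'G': [], 'U': [], '.': []}
--     nuclList = ["A", "C", "G", "U", "."]
--     s = s.upper()
--     nuclCnt = {}  # empty dictionary
--     dinuclCnt = {}  # empty dictionary
--     for x in nuclList:
--         nuclCnt[x] = 0
--         dinuclCnt[x] = {}
--         for y in nuclList:
--             dinuclCnt[x][y] = 0
--
--     # Compute count and lists
--     nuclCnt[s[0]] = 1
--     nuclTotal = 1
--     dinuclTotal = 0
--     for i in range(len(s) - 1):
--         x = s[i];
--         y = s[i + 1]
--         List[x].append(y)
--         nuclCnt[y] += 1;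
--         nuclTotal += 1
--         dinuclCnt[x][y] += 1;
--         dinuclTotal += 1
--     assert (nuclTotal == len(s))
--     assert (dinuclTotal == len(s) - 1)
--     return nuclCnt, dinuclCnt, List
-- ===== SOURCE B (Python) =====
-- def computeCountAndLists(s):
--     """Same result as the original: builds the successor lists first via a
--     zip of consecutive characters, derives nucleotide counts by folding the
--     tail onto a zero table, and tabulates dinucleotide counts afterwards by
--     counting inside the already-collected successor lists."""
--     nuclList = ["A", "C", "G", "U", "."]
--     s = s.upper()
--     pairs = list(zip(s, s[1:]))
--     List = {x: [y for (p, y) in pairs if p == x] for x in nuclList}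
--     nuclCnt = {x: 0 for x in nuclList}
--     nuclCnt[s[0]] = 1
--     for c in s[1:]:
--         nuclCnt[c] += 1
--     dinuclCnt = {x: {y: List[x].count(y) for y in nuclList} for x in nuclList}
--     return nuclCnt, dinuclCnt, List
-- ===== Notes on version B (the rewrite author's own statement) =====
-- stated objective: alternative
-- what changed: Instead of one loop that interleaves all three tables, B zips the string with its shift to build the successor lists by comprehension, folds the tail onto a zero table for nucleotide counts, and afterwards tabulates dinucleotide counts by counting inside the already-collected successor lists; the two asserts and the running totals are dropped.
import Mathlib
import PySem

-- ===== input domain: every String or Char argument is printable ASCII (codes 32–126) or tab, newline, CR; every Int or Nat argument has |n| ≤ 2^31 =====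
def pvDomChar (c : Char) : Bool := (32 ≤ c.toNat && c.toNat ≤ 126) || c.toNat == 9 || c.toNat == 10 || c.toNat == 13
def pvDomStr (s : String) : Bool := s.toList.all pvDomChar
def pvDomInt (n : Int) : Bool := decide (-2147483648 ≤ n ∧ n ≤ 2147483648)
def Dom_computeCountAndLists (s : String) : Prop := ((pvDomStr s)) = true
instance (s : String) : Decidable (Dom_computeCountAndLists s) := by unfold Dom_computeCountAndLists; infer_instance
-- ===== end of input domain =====

-- B rebuilds the same three tables by a different decomposition: successor lists by a zip/comprehension,
-- nucleotide counts by folding the tail onto a zero table, and the dinucleotide table afterwards by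
-- counting inside the already-collected successor lists (objective: alternative, not faster).

-- ===== PORT A =====

-- A's loop state: (List, nuclCnt, dinuclCnt, nuclTotal, dinuclTotal); none = a KeyError was raised
abbrev pvStA := (PySem.Dict String (List String)) × (PySem.Dict String Int) ×
  (PySem.Dict String (PySem.Dict String Int)) × Int × Int

-- one iteration of A's `for i in range(len(s)-1)` body
def pvStepA (su : String) (st : Option pvStA) (i : Int) : Option pvStA :=
  match st with
  | none => none
  | some (L, nc, dc, nt, dt) =>
    match PySem.Str.pyGet? su i, PySem.Str.pyGet? su (i + 1) with
    | some xc, some yc =>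
      let x := String.ofList [xc]
      let y := String.ofList [yc]
      match L.get? x, nc.get? y, dc.get? x with
      | some lx, some cy, some dx =>
        match dx.get? y with
        | some dxy =>
          some (L.insert x (lx ++ [y]), nc.insert y (cy + 1),
                dc.insert x (dx.insert y (dxy + 1)), nt + 1, dt + 1)
        | none => none      -- KeyError dinuclCnt[x][y]
      | _, _, _ => none     -- KeyError List[x] / nuclCnt[y] / dinuclCnt[x]
    | _, _ => none          -- unreachable: i and i+1 are in range

def computeCountAndLists (s : String) :
    (List (String × Int)) × (List (String × List (String × Int))) × (List (String × List String)) :=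
  let nuclList : List String := ["A", "C", "G", "U", "."]
  let L0 : PySem.Dict String (List String) :=
    PySem.Dict.ofList [("A", []), ("C", []), ("G", []), ("U", []), (".", [])]
  let su := PySem.Str.upper s
  let nc0 : PySem.Dict String Int := nuclList.foldl (fun d x => d.insert x 0) PySem.Dict.empty
  let dc0 : PySem.Dict String (PySem.Dict String Int) :=
    nuclList.foldl
      (fun d x => d.insert x (nuclList.foldl (fun e y => e.insert y 0) PySem.Dict.empty))
      PySem.Dict.empty
  match PySem.Str.pyGet? su 0 with
  | none => ([], [], [])    -- s[0] raises IndexError: excluded by Pre_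
  | some c0 =>
    let nc1 := nc0.insert (String.ofList [c0]) 1
    match (PySem.List.pyRange 0 (PySem.Str.len su - 1)).foldl (pvStepA su)
        (some (L0, nc1, dc0, 1, 0)) with
    | none => ([], [], [])  -- a KeyError in the loop: excluded by Pre_
    | some (L, nc, dc, nt, dt) =>
      if nt = PySem.Str.len su ∧ dt = PySem.Str.len su - 1 then  -- the two asserts
        (nc.items, dc.items.map (fun p => (p.1, p.2.items)), L.items)
      else ([], [], [])     -- AssertionError (never reached)

-- ===== PORT B =====
def computeCountAndLists_alt (s : String) :
    (List (String × Int)) × (List (String × List (String × Int))) × (List (String × List String)) :=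
  let nuclList : List String := ["A", "C", "G", "U", "."]
  let su := PySem.Str.upper s
  let cs : List String := su.toList.map (fun c => String.ofList [c])   -- the characters of s, as 1-char strings
  let pairs : List (String × String) := cs.zip cs.tail             -- zip(s, s[1:])
  let Ld : PySem.Dict String (List String) :=
    PySem.Dict.ofList
      (nuclList.map (fun x => (x, pairs.filterMap (fun p => if p.1 = x then some p.2 else none))))
  match cs with
  | [] => ([], [], [])      -- s[0] raises IndexError: excluded by Pre_
  | c0 :: rest =>
    let nc0 : PySem.Dict String Int := PySem.Dict.ofList (nuclList.map (fun x => (x, (0 : Int))))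
    let nc1 := nc0.insert c0 1
    match rest.foldl
        (fun (d? : Option (PySem.Dict String Int)) c =>
          match d? with
          | none => none
          | some d =>
            match d.get? c with
            | none => none            -- KeyError nuclCnt[c]: excluded by Pre_
            | some v => some (d.insert c (v + 1))) (some nc1) with
    | none => ([], [], [])
    | some nc =>
      let dinucl : List (String × List (String × Int)) :=
        nuclList.map (fun x => (x, nuclList.map (fun y => (y, (List.count y (Ld.getD x []) : Int)))))
      (nc.items, dinucl, Ld.items)

-- ===== PRECONDITION & SPEC =====
-- Pre_ excludes exactly the inputs where A raises: the empty string (IndexError on s[0]) and any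
-- string of length ≥ 2 containing a character other than A,C,G,U,. (case-insensitive), on which
-- A's loop raises KeyError.  (A length-1 string with an invalid character RETURNS and stays inside.)
def Pre_computeCountAndLists (s : String) : Prop :=
  s.toList ≠ [] ∧ (s.toList.length = 1 ∨
    ∀ c ∈ s.toList, c ∈ ['A', 'C', 'G', 'U', '.', 'a', 'c', 'g', 'u'])
instance (s : String) : Decidable (Pre_computeCountAndLists s) := by
  unfold Pre_computeCountAndLists; infer_instance

def pvWitness_computeCountAndLists : String := "A"

def Spec_computeCountAndLists (s : String)
    (out : (List (String × Int)) × (List (String × List (String × Int))) × (List (String × List String))) :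
    Prop := out = computeCountAndLists_alt s
instance (s : String)
    (out : (List (String × Int)) × (List (String × List (String × Int))) × (List (String × List String))) :
    Decidable (Spec_computeCountAndLists s out) := by unfold Spec_computeCountAndLists; infer_instance

-- ===== CLAIM (what is proved, stated in full; the proofs are below) =====
def Claim_equal_computeCountAndLists : Prop := ∀ (s : String), Dom_computeCountAndLists s →
  Pre_computeCountAndLists s → Spec_computeCountAndLists s (computeCountAndLists s)

-- ===== LEMMAS AND PROOFS =====

def pvN : List Char := ['A', 'C', 'G', 'U', '.']
def pvNS : List String := ["A", "C", "G", "U", "."]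
def pvKs (c : Char) : String := String.ofList [c]
def pvZero : PySem.Dict String Int :=
  PySem.Dict.ofList [("A", 0), ("C", 0), ("G", 0), ("U", 0), (".", 0)]

-- pvF: pvStepA with the two indexings abstracted out
def pvF (st : Option pvStA) (ox oy : Option Char) : Option pvStA :=
  match st with
  | none => none
  | some (L, nc, dc, nt, dt) =>
    match ox, oy with
    | some xc, some yc =>
      let x := String.ofList [xc]
      let y := String.ofList [yc]
      match L.get? x, nc.get? y, dc.get? x with
      | some lx, some cy, some dx =>
        match dx.get? y with
        | some dxy =>
          some (L.insert x (lx ++ [y]), nc.insert y (cy + 1),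
                dc.insert x (dx.insert y (dxy + 1)), nt + 1, dt + 1)
        | none => none
      | _, _, _ => none
    | _, _ => none

lemma pvStepA_eq (su : String) (st : Option pvStA) (i : Int) :
    pvStepA su st i = pvF st (PySem.Str.pyGet? su i) (PySem.Str.pyGet? su (i + 1)) := rfl

lemma pvBridgeNat {σ : Type} (F : σ → Option Char → Option Char → σ) :
    ∀ (l : List Char) (st : σ),
      (List.range (l.length - 1)).foldl (fun st j => F st l[j]? l[j + 1]?) st
      = (l.zip l.tail).foldl (fun st p => F st (some p.1) (some p.2)) st := by
  intro l
  induction l with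
  | nil => intro st; simp
  | cons a t ih =>
    cases t with
    | nil => intro st; simp
    | cons b t2 =>
      intro st
      have h1 : (a :: b :: t2 : List Char).length - 1 = ((b :: t2 : List Char).length - 1) + 1 := by
        simp
      rw [h1, List.range_succ_eq_map]
      simp only [List.foldl_cons, List.foldl_map, List.getElem?_cons_zero,
        List.getElem?_cons_succ, Nat.succ_eq_add_one, List.zip_cons_cons, List.tail_cons]
      exact ih (F st (some a) (some b))

lemma pvCastAdd (j : Nat) : ((j : Int) + 1) = ((j + 1 : Nat) : Int) := by push_cast; ring

lemma pvFoldRange (su : String) (st : pvStA) (h : su.toList ≠ []) :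
    (PySem.List.pyRange 0 (PySem.Str.len su - 1)).foldl (pvStepA su) (some st)
    = (su.toList.zip su.toList.tail).foldl (fun st p => pvF st (some p.1) (some p.2)) (some st) := by
  have hl : 1 ≤ su.toList.length := List.length_pos_iff.mpr h
  have hn : PySem.Str.len su - 1 = ((su.toList.length - 1 : Nat) : Int) := by
    rw [PySem.Str.len_eq]; omega
  rw [hn, PySem.List.pyRange_zero_natCast, List.foldl_map]
  have hstep : ∀ (st : Option pvStA) (j : Nat),
      pvStepA su st (j : Int) = pvF st su.toList[j]? su.toList[j + 1]? := by
    intro st j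
    rw [pvStepA_eq, pvCastAdd, PySem.Str.pyGet?_natCast, PySem.Str.pyGet?_natCast]
  simp only [hstep]
  exact pvBridgeNat pvF su.toList (some st)

lemma pvKs_mem {c : Char} (h : c ∈ pvN) : pvKs c ∈ pvNS := by
  fin_cases h <;> decide

lemma pvUpper_valid {c : Char} (h : c ∈ ['A', 'C', 'G', 'U', '.', 'a', 'c', 'g', 'u']) :
    PySem.Chars.upperChar c ∈ pvN := by
  fin_cases h <;> decide

-- invariant carried through A's loop
def pvInv (L : PySem.Dict String (List String)) (nc : PySem.Dict String Int)
    (dc : PySem.Dict String (PySem.Dict String Int)) : Prop :=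
  L.keys = pvNS ∧ (∀ k ∈ pvNS, nc.contains k = true) ∧ dc.keys = pvNS ∧
    (∀ k ∈ pvNS, ∃ dx, dc.get? k = some dx ∧ dx.keys = pvNS)

-- the pure (Option-free) per-table steps
def pvStepL (d : PySem.Dict String (List String)) (p : String × String) :
    PySem.Dict String (List String) := d.insert p.1 (d.getD p.1 [] ++ [p.2])
def pvStepN (d : PySem.Dict String Int) (c : String) : PySem.Dict String Int :=
  d.insert c (d.getD c 0 + 1)
def pvStepD (d : PySem.Dict String (PySem.Dict String Int)) (p : String × String) :
    PySem.Dict String (PySem.Dict String Int) :=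
  d.insert p.1 (pvStepN (d.getD p.1 PySem.Dict.empty) p.2)

lemma pvGetSome {ν : Type} (d : PySem.Dict String ν) (k : String)
    (h : k ∈ d.keys) : ∃ v, d.get? k = some v := by
  rcases ho : d.get? k with _ | v
  · exact absurd ((PySem.Dict.get?_eq_none_iff_not_mem_keys d k).mp ho) (not_not_intro h)
  · exact ⟨v, rfl⟩

lemma pvFoldP (P : List (Char × Char)) :
    ∀ L nc dc (nt dt : Int), pvInv L nc dc →
      (∀ p ∈ P, p.1 ∈ pvN ∧ p.2 ∈ pvN) →
      P.foldl (fun st p => pvF st (some p.1) (some p.2)) (some (L, nc, dc, nt, dt)) =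
      some ((P.map (fun p => (pvKs p.1, pvKs p.2))).foldl pvStepL L,
            (P.map (fun p => pvKs p.2)).foldl pvStepN nc,
            (P.map (fun p => (pvKs p.1, pvKs p.2))).foldl pvStepD dc,
            nt + P.length, dt + P.length) := by
  induction P with
  | nil => intro L nc dc nt dt _ _; simp
  | cons p t ih =>
    intro L nc dc nt dt hInv hP
    obtain ⟨hL, hnc, hdc, hin⟩ := hInv
    obtain ⟨hx, hy⟩ := hP p (List.mem_cons_self)
    have hxS : pvKs p.1 ∈ pvNS := pvKs_mem hx
    have hyS : pvKs p.2 ∈ pvNS := pvKs_mem hy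
    obtain ⟨lx, hlx⟩ := pvGetSome L (pvKs p.1) (hL ▸ hxS)
    obtain ⟨cy, hcy⟩ := pvGetSome nc (pvKs p.2) ((PySem.Dict.contains_iff_mem_keys nc _).mp (hnc _ hyS))
    obtain ⟨dx, hdx, hdxk⟩ := hin _ hxS
    obtain ⟨dxy, hdxy⟩ := pvGetSome dx (pvKs p.2) (hdxk ▸ hyS)
    have hstep : pvF (some (L, nc, dc, nt, dt)) (some p.1) (some p.2) =
        some (pvStepL L (pvKs p.1, pvKs p.2), pvStepN nc (pvKs p.2),
              pvStepD dc (pvKs p.1, pvKs p.2), nt + 1, dt + 1) := by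
      simp only [pvF, pvKs] at *
      simp only [hlx, hcy, hdx, hdxy, pvStepL, pvStepN, pvStepD,
        PySem.Dict.getD_of_get?_eq_some _ _ hlx, PySem.Dict.getD_of_get?_eq_some _ _ hcy,
        PySem.Dict.getD_of_get?_eq_some _ _ hdx, PySem.Dict.getD_of_get?_eq_some _ _ hdxy]
    have hInv' : pvInv (pvStepL L (pvKs p.1, pvKs p.2)) (pvStepN nc (pvKs p.2))
        (pvStepD dc (pvKs p.1, pvKs p.2)) := by
      refine ⟨?_, ?_, ?_, ?_⟩
      · rw [pvStepL, PySem.Dict.keys_insert_of_contains _ _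
          ((PySem.Dict.contains_iff_mem_keys _ _).mpr (hL ▸ hxS))]
        exact hL
      · intro k hk
        rw [pvStepN, PySem.Dict.contains_insert]
        simp [hnc k hk]
      · rw [pvStepD, PySem.Dict.keys_insert_of_contains _ _
          ((PySem.Dict.contains_iff_mem_keys _ _).mpr (hdc ▸ hxS))]
        exact hdc
      · intro k hk
        rw [pvStepD, PySem.Dict.get?_insert]
        by_cases hkx : k = pvKs p.1
        · refine ⟨_, by rw [if_pos hkx], ?_⟩
          rw [PySem.Dict.getD_of_get?_eq_some _ _ hdx, pvStepN,
            PySem.Dict.keys_insert_of_contains _ _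
              ((PySem.Dict.contains_iff_mem_keys _ _).mpr (hdxk ▸ hyS))]
          exact hdxk
        · obtain ⟨dx', h1, h2⟩ := hin k hk
          exact ⟨dx', by rw [if_neg hkx]; exact h1, h2⟩
    rw [List.foldl_cons, hstep, ih _ _ _ _ _ hInv' (fun q hq => hP q (List.mem_cons_of_mem _ hq))]
    simp only [List.map_cons, List.foldl_cons, List.length_cons, Option.some.injEq,
      Prod.mk.injEq]
    refine ⟨trivial, trivial, trivial, by push_cast; ring, by push_cast; ring⟩

lemma pvSetUpdate (s : PySem.Set String) (xs : List String) (h : ∀ x ∈ xs, x ∈ s) :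
    PySem.Set.update s xs = s := by
  rw [PySem.Set.update_eq_append_filter]
  simp
  exact h

lemma pvKeysL (P : List (String × String)) (L : PySem.Dict String (List String))
    (h : ∀ p ∈ P, p.1 ∈ L.keys) : (P.foldl pvStepL L).keys = L.keys := by
  have := PySem.Dict.keys_foldl_insert_key P Prod.fst
    (fun d p => d.getD p.1 [] ++ [p.2]) L
  rw [show pvStepL = (fun d (p : String × String) => d.insert p.1 (d.getD p.1 [] ++ [p.2])) from rfl]
  rw [this, pvSetUpdate]
  intro x hx
  obtain ⟨p, hp, rfl⟩ := List.mem_map.mp hx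
  exact h p hp

lemma pvKeysD (P : List (String × String)) (dc : PySem.Dict String (PySem.Dict String Int))
    (h : ∀ p ∈ P, p.1 ∈ dc.keys) : (P.foldl pvStepD dc).keys = dc.keys := by
  have := PySem.Dict.keys_foldl_insert_key P Prod.fst
    (fun d (p : String × String) => pvStepN (d.getD p.1 PySem.Dict.empty) p.2) dc
  rw [show pvStepD = (fun d (p : String × String) =>
    d.insert p.1 (pvStepN (d.getD p.1 PySem.Dict.empty) p.2)) from rfl]
  rw [this, pvSetUpdate]
  intro x hx
  obtain ⟨p, hp, rfl⟩ := List.mem_map.mp hx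
  exact h p hp

lemma pvKeysN (cs : List String) (nc : PySem.Dict String Int)
    (h : ∀ c ∈ cs, c ∈ nc.keys) : (cs.foldl pvStepN nc).keys = nc.keys := by
  have := PySem.Dict.keys_foldl_insert cs (fun d c => d.getD c 0 + 1) nc
  rw [show pvStepN = (fun (d : PySem.Dict String Int) c => d.insert c (d.getD c 0 + 1)) from rfl]
  rw [this, pvSetUpdate _ _ h]

-- the successor lists collected by A's loop, read one key at a time
lemma pvGetD_foldL (P : List (String × String)) (L : PySem.Dict String (List String)) (x : String) :
    (P.foldl pvStepL L).getD x [] =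
      L.getD x [] ++ (P.filter (fun p => p.1 == x)).map (fun p => p.2) := by
  have hmod : pvStepL = (fun d (p : String × String) => d.modify p.1 [] (fun l => l ++ [p.2])) := rfl
  rw [hmod, PySem.Dict.getD_foldl_modify_append]

lemma pvGetD_foldD (P : List (String × String)) :
    ∀ (dc : PySem.Dict String (PySem.Dict String Int)) (x : String),
      (P.foldl pvStepD dc).getD x PySem.Dict.empty =
        ((P.filter (fun p => p.1 == x)).map (fun p => p.2)).foldl pvStepN
          (dc.getD x PySem.Dict.empty) := by
  induction P with
  | nil => intro dc x; simp
  | cons p t ih =>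
    intro dc x
    by_cases hpx : p.1 = x
    · rw [List.foldl_cons, ih, List.filter_cons, if_pos (by simp [hpx]), List.map_cons,
        List.foldl_cons,
        show pvStepD dc p = dc.insert p.1 (pvStepN (dc.getD p.1 PySem.Dict.empty) p.2) from rfl,
        PySem.Dict.getD_insert, if_pos hpx.symm, hpx]
    · rw [List.foldl_cons, ih, List.filter_cons, if_neg (by simp [hpx]),
        show pvStepD dc p = dc.insert p.1 (pvStepN (dc.getD p.1 PySem.Dict.empty) p.2) from rfl,
        PySem.Dict.getD_insert, if_neg (fun hh => hpx hh.symm)]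

lemma pvInnerGetD (ys : List String) (d : PySem.Dict String Int) (y : String) :
    (ys.foldl pvStepN d).getD y 0 = d.getD y 0 + (ys.count y : Int) := by
  have : pvStepN = (fun (d : PySem.Dict String Int) c => d.insert c (d.getD c 0 + 1)) := rfl
  rw [this, PySem.Dict.getD_foldl_insert_add_one]

lemma pvFilterMap (l : List (String × String)) (x : String) :
    l.filterMap (fun p => if p.1 = x then some p.2 else none) =
      (l.filter (fun p => p.1 == x)).map (fun p => p.2) := by
  induction l with
  | nil => rfl
  | cons p t ih =>
    by_cases h : p.1 = x
    · simp [h, ih]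
    · simp [h, beq_false_of_ne h, ih]

lemma pvFoldNB (cs : List String) :
    ∀ (nc : PySem.Dict String Int), (∀ c ∈ cs, nc.contains c = true) →
      cs.foldl
        (fun (d? : Option (PySem.Dict String Int)) c =>
          match d? with
          | none => none
          | some d =>
            match d.get? c with
            | none => none
            | some v => some (d.insert c (v + 1))) (some nc) = some (cs.foldl pvStepN nc) := by
  induction cs with
  | nil => intro nc _; rfl
  | cons c t ih =>
    intro nc h
    obtain ⟨v, hv⟩ := pvGetSome nc c
      ((PySem.Dict.contains_iff_mem_keys nc c).mp (h c List.mem_cons_self))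
    have hstep : pvStepN nc c = nc.insert c (v + 1) := by
      rw [pvStepN, PySem.Dict.getD_of_get?_eq_some _ _ hv]
    simp only [List.foldl_cons, hv, hstep]
    exact ih _ (fun c' hc' => by
      rw [PySem.Dict.contains_insert]
      simp [h c' (List.mem_cons_of_mem _ hc')])

lemma pvItems_ofList_map {ν : Type} (f : String → ν) :
    (PySem.Dict.ofList (pvNS.map (fun x => (x, f x)))).items = pvNS.map (fun x => (x, f x)) := by
  have h1 : PySem.Dict.ofList (pvNS.map (fun x => (x, f x))) =
      pvNS.foldl (fun d x => d.insert x (f x)) PySem.Dict.empty := by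
    rw [show PySem.Dict.ofList (pvNS.map (fun x => (x, f x))) =
      (pvNS.map (fun x => (x, f x))).foldl (fun d p => d.insert p.1 p.2) PySem.Dict.empty from rfl,
      List.foldl_map]
  rw [h1, PySem.Dict.items_foldl_insert_fresh pvNS (fun x => x) f PySem.Dict.empty
    (fun a _ => by simp [pysem]) (by simp; decide)]
  simp [show (PySem.Dict.empty : PySem.Dict String ν).items = [] from rfl]

-- the literal initial tables of port A
def pvL0 : PySem.Dict String (List String) :=
  PySem.Dict.ofList [("A", []), ("C", []), ("G", []), ("U", []), (".", [])]
def pvNc0 : PySem.Dict String Int :=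
  (["A", "C", "G", "U", "."] : List String).foldl (fun d x => d.insert x 0) PySem.Dict.empty
def pvDc0 : PySem.Dict String (PySem.Dict String Int) :=
  (["A", "C", "G", "U", "."] : List String).foldl
    (fun d x => d.insert x ((["A", "C", "G", "U", "."] : List String).foldl
      (fun e y => e.insert y 0) PySem.Dict.empty))
    PySem.Dict.empty

lemma pvInv0 (c0 : Char) : pvInv pvL0 (pvNc0.insert (pvKs c0) 1) pvDc0 := by
  refine ⟨by decide, ?_, by decide, ?_⟩
  · intro k hk
    rw [PySem.Dict.contains_insert]
    have : pvNc0.contains k = true := by fin_cases hk <;> decide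
    simp [this]
  · intro k hk
    have : pvDc0.get? k = some pvZero := by fin_cases hk <;> decide
    exact ⟨pvZero, this, by decide⟩

lemma pvA_val (s : String) (c0 : Char) (t : List Char)
    (hl : (PySem.Str.upper s).toList = c0 :: t)
    (hP : ∀ p ∈ (c0 :: t).zip t, p.1 ∈ pvN ∧ p.2 ∈ pvN) :
    computeCountAndLists s =
      (((((c0 :: t).zip t).map (fun p => pvKs p.2)).foldl pvStepN
          (pvNc0.insert (pvKs c0) 1)).items,
       (((((c0 :: t).zip t).map (fun p => (pvKs p.1, pvKs p.2))).foldl pvStepD pvDc0).items).map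
          (fun p => (p.1, p.2.items)),
       ((((c0 :: t).zip t).map (fun p => (pvKs p.1, pvKs p.2))).foldl pvStepL pvL0).items) := by
  have hne' : (PySem.Str.upper s).toList ≠ [] := by rw [hl]; simp
  have hget0 : PySem.Str.pyGet? (PySem.Str.upper s) 0 = some c0 := by
    rw [show (0 : Int) = ((0 : Nat) : Int) from rfl, PySem.Str.pyGet?_natCast, hl]; rfl
  have hzlen : ((c0 :: t).zip t).length = t.length := by
    rw [List.length_zip]; simp
  have hlen : PySem.Str.len (PySem.Str.upper s) = ((t.length + 1 : Nat) : Int) := by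
    rw [PySem.Str.len_eq, hl]; simp
  simp only [computeCountAndLists, hget0]
  rw [pvFoldRange _ _ hne', hl]
  simp only [List.tail_cons]
  rw [show PySem.Dict.ofList [("A", ([] : List String)), ("C", []), ("G", []), ("U", []), (".", [])]
        = pvL0 from rfl,
      show (List.foldl
          (fun d x => d.insert x (List.foldl (fun e y => e.insert y (0 : Int)) PySem.Dict.empty
            (["A", "C", "G", "U", "."] : List String)))
          PySem.Dict.empty (["A", "C", "G", "U", "."] : List String)) = pvDc0 from rfl,
      show (List.foldl (fun d x => d.insert x (0 : Int)) PySem.Dict.empty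
          (["A", "C", "G", "U", "."] : List String)) = pvNc0 from rfl,
      show String.ofList [c0] = pvKs c0 from rfl]
  rw [pvFoldP ((c0 :: t).zip t) pvL0 (pvNc0.insert (pvKs c0) 1) pvDc0 1 0 (pvInv0 c0) hP]
  simp only [hzlen, hlen]
  rw [if_pos ⟨by push_cast; ring, by push_cast; ring⟩]

lemma pvB_val (s : String) (c0 : Char) (t : List Char)
    (hl : (PySem.Str.upper s).toList = c0 :: t)
    (hT : ∀ c ∈ t, c ∈ pvN) :
    computeCountAndLists_alt s =
      (((t.map pvKs).foldl pvStepN (pvNc0.insert (pvKs c0) 1)).items,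
       pvNS.map (fun x => (x,
         pvNS.map (fun y => (y,
           (List.count y ((PySem.Dict.ofList (pvNS.map
             (fun x => (x, (((c0 :: t).zip t).map (fun p => (pvKs p.1, pvKs p.2))).filterMap
               (fun p => if p.1 = x then some p.2 else none))))).getD x []) : Int))))),
       (PySem.Dict.ofList (pvNS.map
         (fun x => (x, (((c0 :: t).zip t).map (fun p => (pvKs p.1, pvKs p.2))).filterMap
           (fun p => if p.1 = x then some p.2 else none))))).items) := by
  have hcont : ∀ c ∈ t.map pvKs, (pvNc0.insert (pvKs c0) 1).contains c = true := by
    intro c hc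
    obtain ⟨c', hc', rfl⟩ := List.mem_map.mp hc
    have hmem : pvKs c' ∈ pvNS := pvKs_mem (hT c' hc')
    have hall : ∀ k ∈ pvNS, pvNc0.contains k = true := by decide
    rw [PySem.Dict.contains_insert]
    simp [hall _ hmem]
  have hcs : (c0 :: t).map (fun c => String.ofList [c]) = pvKs c0 :: t.map pvKs := rfl
  simp only [computeCountAndLists_alt, hl, hcs, List.tail_cons]
  rw [
      show (PySem.Dict.ofList ((["A", "C", "G", "U", "."] : List String).map (fun x => (x, (0 : Int)))))
        = pvNc0 from rfl]
  have hzip : (pvKs c0 :: t.map pvKs).zip (t.map pvKs)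
      = ((c0 :: t).zip t).map (fun p => (pvKs p.1, pvKs p.2)) := by
    rw [show (pvKs c0 :: t.map pvKs) = (c0 :: t).map pvKs from rfl, List.zip_map]; rfl
  rw [hzip, pvFoldNB (t.map pvKs) _ hcont]
  rfl

-- closed facts about the initial tables
lemma pvL0_keys : pvL0.keys = pvNS := by decide
lemma pvL0_getD : ∀ x ∈ pvNS, pvL0.getD x [] = [] := by decide
lemma pvDc0_keys : pvDc0.keys = pvNS := by decide
lemma pvDc0_getD : ∀ x ∈ pvNS, pvDc0.getD x PySem.Dict.empty = pvZero := by decide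
lemma pvZero_keys : pvZero.keys = pvNS := by decide
lemma pvZero_getD : ∀ y ∈ pvNS, pvZero.getD y 0 = 0 := by decide
lemma pvNS_nodup : pvNS.Nodup := by decide

lemma pvLd_getD (P' : List (String × String)) (x : String) (hx : x ∈ pvNS) :
    (PySem.Dict.ofList (pvNS.map (fun x => (x, P'.filterMap
        (fun p => if p.1 = x then some p.2 else none))))).getD x [] =
      P'.filterMap (fun p => if p.1 = x then some p.2 else none) := by
  set f : String → List String :=
    fun x => P'.filterMap (fun p => if p.1 = x then some p.2 else none) with hf
  have hitems := pvItems_ofList_map f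
  have hkeys : (PySem.Dict.ofList (pvNS.map (fun x => (x, f x)))).keys = pvNS := by
    show (PySem.Dict.ofList (pvNS.map (fun x => (x, f x)))).items.map Prod.fst = pvNS
    rw [hitems, List.map_map]
    rw [show (Prod.fst ∘ fun x : String => (x, f x)) = id from rfl, List.map_id]
  exact PySem.Dict.getD_of_mem_items _
    (by rw [hitems]; exact List.mem_map.mpr ⟨x, hx, rfl⟩)
    (by rw [hkeys]; exact pvNS_nodup) []

-- ===== VERDICT (by name: the statement is the Claim_ definition above) =====
theorem computeCountAndLists_spec : Claim_equal_computeCountAndLists := by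
  intro s _ hpre
  obtain ⟨hne, hval⟩ := hpre
  unfold Spec_computeCountAndLists
  obtain ⟨d0, t0, hs⟩ : ∃ d0 t0, s.toList = d0 :: t0 := by
    cases h : s.toList with
    | nil => exact absurd h hne
    | cons a b => exact ⟨a, b, rfl⟩
  have hl : (PySem.Str.upper s).toList =
      PySem.Chars.upperChar d0 :: t0.map PySem.Chars.upperChar := by
    rw [PySem.Str.toList_upper, show PySem.Chars.upper s.toList
      = s.toList.map PySem.Chars.upperChar from rfl, hs]
    rfl
  set c0 := PySem.Chars.upperChar d0 with hc0
  set t := t0.map PySem.Chars.upperChar with ht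
  have hTP : (∀ c ∈ t, c ∈ pvN) ∧ (∀ p ∈ (c0 :: t).zip t, p.1 ∈ pvN ∧ p.2 ∈ pvN) := by
    rcases hval with h1 | h2
    · have ht0 : t0 = [] := by
        rw [hs] at h1; simpa using h1
      constructor
      · intro c hc; rw [ht, ht0] at hc; simp at hc
      · intro p hp; rw [ht, ht0] at hp; simp at hp
    · have hall : ∀ c ∈ c0 :: t, c ∈ pvN := by
        intro c hc
        rw [ht, hc0, show (PySem.Chars.upperChar d0 :: t0.map PySem.Chars.upperChar)
          = (d0 :: t0).map PySem.Chars.upperChar from rfl, ← hs] at hc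
        obtain ⟨c', hc', rfl⟩ := List.mem_map.mp hc
        exact pvUpper_valid (h2 c' hc')
      refine ⟨fun c hc => hall c (List.mem_cons_of_mem _ hc), fun p hp => ?_⟩
      obtain ⟨hp1, hp2⟩ := List.of_mem_zip hp
      exact ⟨hall _ hp1, hall _ (List.mem_cons_of_mem _ hp2)⟩
  obtain ⟨hT, hP⟩ := hTP
  rw [pvA_val s c0 t hl hP, pvB_val s c0 t hl hT]
  set P' : List (String × String) :=
    ((c0 :: t).zip t).map (fun p => (pvKs p.1, pvKs p.2)) with hP'
  have hfstP' : ∀ p ∈ P', p.1 ∈ pvNS := by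
    intro p hp
    obtain ⟨q, hq, rfl⟩ := List.mem_map.mp hp
    exact pvKs_mem (hP q hq).1
  have hsndP' : ∀ p ∈ P', p.2 ∈ pvNS := by
    intro p hp
    obtain ⟨q, hq, rfl⟩ := List.mem_map.mp hp
    exact pvKs_mem (hP q hq).2
  simp only [Prod.mk.injEq]
  refine ⟨?_, ?_, ?_⟩
  · -- nucleotide counts: same fold over the same list
    have hmap : ((c0 :: t).zip t).map (fun p => pvKs p.2) = t.map pvKs := by
      rw [show (fun p : Char × Char => pvKs p.2) = pvKs ∘ Prod.snd from rfl, ← List.map_map,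
        List.map_snd_zip (by simp)]
    rw [hmap]
  · -- dinucleotide table
    have hkeysD : (P'.foldl pvStepD pvDc0).keys = pvNS := by
      rw [pvKeysD P' pvDc0 (fun p hp => by rw [pvDc0_keys]; exact hfstP' p hp), pvDc0_keys]
    rw [PySem.Dict.items_eq_map_keys _ (by rw [hkeysD]; exact pvNS_nodup) PySem.Dict.empty,
      hkeysD, List.map_map]
    apply List.map_congr_left
    intro x hx
    simp only [Function.comp_apply]
    rw [pvGetD_foldD, pvDc0_getD x hx]
    set ys : List String := (P'.filter (fun p => p.1 == x)).map (fun p => p.2) with hys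
    have hysN : ∀ c ∈ ys, c ∈ pvNS := by
      intro c hc
      obtain ⟨p, hp, rfl⟩ := List.mem_map.mp hc
      exact hsndP' p (List.mem_filter.mp hp).1
    have hkeysInner : (ys.foldl pvStepN pvZero).keys = pvNS := by
      rw [pvKeysN ys pvZero (fun c hc => by rw [pvZero_keys]; exact hysN c hc), pvZero_keys]
    rw [PySem.Dict.items_eq_map_keys _ (by rw [hkeysInner]; exact pvNS_nodup) (0 : Int),
      hkeysInner]
    congr 1
    apply List.map_congr_left
    intro y hy
    rw [pvInnerGetD, pvZero_getD y hy, zero_add, pvLd_getD P' x hx, pvFilterMap]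
  · -- successor lists
    have hkeysL : (P'.foldl pvStepL pvL0).keys = pvNS := by
      rw [pvKeysL P' pvL0 (fun p hp => by rw [pvL0_keys]; exact hfstP' p hp), pvL0_keys]
    rw [PySem.Dict.items_eq_map_keys _ (by rw [hkeysL]; exact pvNS_nodup) [], hkeysL,
      pvItems_ofList_map (fun x => P'.filterMap (fun p => if p.1 = x then some p.2 else none))]
    apply List.map_congr_left
    intro x hx
    rw [pvGetD_foldL, pvL0_getD x hx, List.nil_append, pvFilterMap]
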